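-- pv_equiv track=rewrite | github.com/ThilakShekharShriyan/AppLovin | src/runner.py | build_order_by
-- ===== SOURCE A (Python) =====
-- def build_order_by(order_by, select_items=None):
--     """Build ORDER BY clause, resolving aliases from SELECT if needed."""
--     if not order_by:
--         return ""
--
--     # Build alias mapping from SELECT items
--     alias_map = {}
--     if select_items:
--         for item in select_items:
--             if isinstance(item, dict):
--                 # Handle aggregate functions with optional alias
--                 if "as" in item:
--                     alias_name = item["as"]
--                     # Find the function and column (skip the 'as' key)
--                     for key, val in item.items():
--                         if key != "as":
--                             func, col = key, val
--                             alias_map[alias_name] = f'{func.upper()}({col})'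
--                             break
--                 else:
--                     # No explicit alias - use function(column) format
--                     for func, col in item.items():
--                         alias_map[f'{func.upper()}({col})'] = f'{func.upper()}({col})'
--                         break
--
--     parts = []
--     for o in order_by:
--         col = o['col']
--         # Resolve alias if it exists in the alias map
--         resolved_col = alias_map.get(col, col)
--         parts.append(f"{resolved_col} {o.get('dir','asc').upper()}")
--
--     return "ORDER BY " + ", ".join(parts)
-- ===== SOURCE B (Python) =====
-- def _alias_entry(item):
--     """The (key, value) pair this SELECT item would contribute to alias resolution, or None."""
--     if "as" in item:
--         for k, v in item.items():
--             if k != "as":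
--                 return (item["as"], f"{k.upper()}({v})")
--         return None
--     for k, v in item.items():
--         s = f"{k.upper()}({v})"
--         return (s, s)
--     return None
--
--
-- def _resolve(select_items, col):
--     """Resolve col by scanning select_items on demand; last matching entry wins."""
--     res = col
--     for item in select_items:
--         e = _alias_entry(item)
--         if e is not None and e[0] == col:
--             res = e[1]
--     return res
--
--
-- def build_order_by(order_by, select_items=None):
--     if not order_by:
--         return ""
--     sel = select_items or []
--     return "ORDER BY " + ", ".join(
--         f"{_resolve(sel, o['col'])} {o.get('dir', 'asc').upper()}" for o in order_by
--     )
-- ===== Notes on version B (the rewrite author's own statement) =====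
-- stated objective: alternative
-- what changed: Drops the precomputed alias_map dict entirely: each ORDER BY column is resolved by scanning the SELECT items on demand, keeping the last matching alias entry (which reproduces dict-overwrite semantics); output is built by a generator inside join instead of an appended parts list.
import Mathlib
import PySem

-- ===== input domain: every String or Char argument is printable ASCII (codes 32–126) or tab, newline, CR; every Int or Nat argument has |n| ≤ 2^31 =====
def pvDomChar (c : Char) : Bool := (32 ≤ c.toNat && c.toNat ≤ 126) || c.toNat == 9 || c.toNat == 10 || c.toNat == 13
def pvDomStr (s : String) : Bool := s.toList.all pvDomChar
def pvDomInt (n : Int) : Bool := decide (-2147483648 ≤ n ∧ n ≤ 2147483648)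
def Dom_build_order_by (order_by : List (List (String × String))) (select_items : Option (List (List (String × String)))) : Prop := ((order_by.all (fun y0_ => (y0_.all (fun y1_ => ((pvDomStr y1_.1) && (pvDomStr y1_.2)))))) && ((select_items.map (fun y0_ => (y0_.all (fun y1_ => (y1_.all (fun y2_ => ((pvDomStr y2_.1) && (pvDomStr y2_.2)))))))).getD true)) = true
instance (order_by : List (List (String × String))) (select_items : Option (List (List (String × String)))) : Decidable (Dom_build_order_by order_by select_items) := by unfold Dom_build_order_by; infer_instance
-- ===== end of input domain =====

-- ===== PORT A =====
-- B replaces A's precomputed alias_map dict by an on-demand scan of select_items per ORDER BY column (same results; no speed claim).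
-- Port of A: build alias_map by folding over select_items, then build parts by appending.
def build_order_by (order_by : List (List (String × String))) (select_items : Option (List (List (String × String)))) : String :=
  if order_by.isEmpty then "" else
  let aliasMap : PySem.Dict String String :=
    match select_items with
    | none => PySem.Dict.empty
    | some sel =>
      -- 'if select_items:' — an empty list is falsy, but the fold over [] leaves the map empty anyway
      sel.foldl (fun m item =>
        let d := PySem.Dict.ofList item
        if d.contains "as" then
          match d.items.find? (fun p => p.1 != "as") with
          | some (f, c) => m.insert (d.getD "as" "") (PySem.Str.upper f ++ "(" ++ c ++ ")")
          | none => m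
        else
          match d.items.head? with
          | some (f, c) => m.insert (PySem.Str.upper f ++ "(" ++ c ++ ")") (PySem.Str.upper f ++ "(" ++ c ++ ")")
          | none => m) PySem.Dict.empty
  let parts := order_by.foldl (fun ps o =>
    let d := PySem.Dict.ofList o
    let col := d.getD "col" ""   -- o['col']: total under Pre_ (the key is present)
    ps ++ [aliasMap.getD col col ++ " " ++ PySem.Str.upper (d.getD "dir" "asc")]) []
  "ORDER BY " ++ PySem.Str.join ", " parts

-- ===== PORT B =====
-- the (key, value) pair this SELECT item would contribute to alias resolution, or none
def aliasEntry (item : List (String × String)) : Option (String × String) :=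
  let d := PySem.Dict.ofList item
  if d.contains "as" then
    match d.items.find? (fun p => p.1 != "as") with
    | some (f, c) => some (d.getD "as" "", PySem.Str.upper f ++ "(" ++ c ++ ")")
    | none => none
  else
    match d.items.head? with
    | some (f, c) => some (PySem.Str.upper f ++ "(" ++ c ++ ")", PySem.Str.upper f ++ "(" ++ c ++ ")")
    | none => none

-- resolve col by scanning select_items on demand; last matching entry wins
def resolveCol (sel : List (List (String × String))) (col : String) : String :=
  sel.foldl (fun res item =>
    match aliasEntry item with
    | some (k, v) => if k == col then v else res
    | none => res) col

def build_order_by_alt (order_by : List (List (String × String))) (select_items : Option (List (List (String × String)))) : String :=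
  if order_by.isEmpty then "" else
  let sel := select_items.getD []
  "ORDER BY " ++ PySem.Str.join ", " (order_by.map (fun o =>
    let d := PySem.Dict.ofList o
    resolveCol sel (d.getD "col" "") ++ " " ++ PySem.Str.upper (d.getD "dir" "asc")))

-- ===== PRECONDITION & SPEC =====
-- Pre_ excludes exactly the inputs where some order_by entry lacks the key 'col': there Python A raises KeyError.
def Pre_build_order_by (order_by : List (List (String × String))) (select_items : Option (List (List (String × String)))) : Prop :=
  (order_by.all fun o => o.any fun p => p.1 == "col") = true

instance (order_by : List (List (String × String))) (select_items : Option (List (List (String × String)))) : Decidable (Pre_build_order_by order_by select_items) := by unfold Pre_build_order_by; infer_instance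

def pvWitness_build_order_by : (List (List (String × String))) × (Option (List (List (String × String)))) :=
  ([[("col", "x"), ("dir", "desc")]], some [[("sum", "y"), ("as", "x")]])

def Spec_build_order_by (order_by : List (List (String × String))) (select_items : Option (List (List (String × String)))) (out : String) : Prop := out = build_order_by_alt order_by select_items
instance (order_by : List (List (String × String))) (select_items : Option (List (List (String × String)))) (out : String) : Decidable (Spec_build_order_by order_by select_items out) := by unfold Spec_build_order_by; infer_instance

-- ===== CLAIM (what is proved, stated in full; the proofs are below) =====
def Claim_equal_build_order_by : Prop := ∀ (order_by : List (List (String × String))) (select_items : Option (List (List (String × String)))), Dom_build_order_by order_by select_items → Pre_build_order_by order_by select_items → Spec_build_order_by order_by select_items (build_order_by order_by select_items)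

-- ===== LEMMAS AND PROOFS =====

-- A's map-building step is exactly 'insert the aliasEntry of the item, if any'
theorem stepA_eq_entry (m : PySem.Dict String String) (item : List (String × String)) :
    (let d := PySem.Dict.ofList item
     if d.contains "as" then
       match d.items.find? (fun p => p.1 != "as") with
       | some (f, c) => m.insert (d.getD "as" "") (PySem.Str.upper f ++ "(" ++ c ++ ")")
       | none => m
     else
       match d.items.head? with
       | some (f, c) => m.insert (PySem.Str.upper f ++ "(" ++ c ++ ")") (PySem.Str.upper f ++ "(" ++ c ++ ")")
       | none => m)
    = match aliasEntry item with
      | some (k, v) => m.insert k v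
      | none => m := by
  simp only [aliasEntry]
  split <;> rename_i h
  · rcases hf : (PySem.Dict.ofList item).items.find? (fun p => p.1 != "as") with _ | ⟨f, c⟩ <;> simp [hf]
  · rcases hh : (PySem.Dict.ofList item).items.head? with _ | ⟨f, c⟩ <;> simp

-- lookup through A's fold equals the option-valued scan
theorem get?_foldA (sel : List (List (String × String))) (m : PySem.Dict String String) (col : String) :
    (sel.foldl (fun m item =>
        match aliasEntry item with
        | some (k, v) => m.insert k v
        | none => m) m).get? col
    = sel.foldl (fun acc item =>
        match aliasEntry item with
        | some (k, v) => if k == col then some v else acc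
        | none => acc) (m.get? col) := by
  induction sel generalizing m with
  | nil => rfl
  | cons item rest ih =>
    simp only [List.foldl_cons]
    rcases he : aliasEntry item with _ | ⟨k, v⟩
    · simp [ih]
    · simp only [ih]
      congr 1
      by_cases hk : k = col
      · subst hk; simp [PySem.Dict.get?_insert_self]
      · rw [PySem.Dict.get?_insert_of_ne m v (by exact fun h => hk h.symm)]
        simp [hk]

-- the option-valued scan, defaulted with col, is B's resolveCol
theorem optScan_getD (sel : List (List (String × String))) (acc : Option String) (col : String) :
    (sel.foldl (fun acc item =>
        match aliasEntry item with
        | some (k, v) => if k == col then some v else acc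
        | none => acc) acc).getD col
    = sel.foldl (fun res item =>
        match aliasEntry item with
        | some (k, v) => if k == col then v else res
        | none => res) (acc.getD col) := by
  induction sel generalizing acc with
  | nil => rfl
  | cons item rest ih =>
    simp only [List.foldl_cons]
    rw [ih]
    congr 1
    rcases he : aliasEntry item with _ | ⟨k, v⟩
    · simp
    · by_cases hk : (k == col) = true <;> simp [hk]

theorem getD_foldA (sel : List (List (String × String))) (col : String) :
    ((sel.foldl (fun m item =>
        match aliasEntry item with
        | some (k, v) => m.insert k v
        | none => m) PySem.Dict.empty).getD col col) = resolveCol sel col := by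
  rw [PySem.Dict.getD_eq_get?_getD, get?_foldA, resolveCol]
  have h : (PySem.Dict.empty : PySem.Dict String String).get? col = none := PySem.Dict.get?_empty col
  rw [h, optScan_getD]
  rfl

theorem foldA_eq_foldEntry (sel : List (List (String × String))) (m : PySem.Dict String String) :
    (sel.foldl (fun m item =>
      let d := PySem.Dict.ofList item
      if d.contains "as" then
        match d.items.find? (fun p => p.1 != "as") with
        | some (f, c) => m.insert (d.getD "as" "") (PySem.Str.upper f ++ "(" ++ c ++ ")")
        | none => m
      else
        match d.items.head? with
        | some (f, c) => m.insert (PySem.Str.upper f ++ "(" ++ c ++ ")") (PySem.Str.upper f ++ "(" ++ c ++ ")")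
        | none => m) m)
    = (sel.foldl (fun m item =>
        match aliasEntry item with
        | some (k, v) => m.insert k v
        | none => m) m) := by
  induction sel generalizing m with
  | nil => rfl
  | cons item rest _ => simp only [List.foldl_cons, stepA_eq_entry]

-- ===== VERDICT (by name: the statement is the Claim_ definition above) =====
theorem build_order_by_spec : Claim_equal_build_order_by := by
  intro order_by select_items _ _
  unfold Spec_build_order_by build_order_by build_order_by_alt
  by_cases hob : order_by.isEmpty
  · simp [hob]
  · rw [if_neg hob, if_neg hob]
    rcases select_items with _ | sel
    · simp only [Option.getD_none]
      rw [PySem.List.foldl_append_singleton_eq_map, List.nil_append]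
      refine congrArg (fun L => "ORDER BY " ++ PySem.Str.join ", " L) (List.map_congr_left ?_)
      intro o _
      simp [resolveCol, PySem.Dict.getD_empty]
    · simp only [Option.getD_some]
      rw [PySem.List.foldl_append_singleton_eq_map, List.nil_append, foldA_eq_foldEntry]
      refine congrArg (fun L => "ORDER BY " ++ PySem.Str.join ", " L) (List.map_congr_left ?_)
      intro o _
      rw [getD_foldA]
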